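-- pv_equiv track=rewrite | github.com/MaxShroyer/MD_RL_finetune_scripts | chess_QA/synth-chess-dataset/src/tasks.py | build_balanced_mixed_task_counts
-- ===== SOURCE A (Python) =====
-- TASK_TYPES = (
--     "list_all_pieces",
--     "count_by_color",
--     "list_color_pieces",
--     "color_presence_check",
-- )
--
-- def build_balanced_mixed_task_counts(total_rows: int) -> dict[str, int]:
--     """Distribute rows across mixed tasks as evenly as possible."""
--
--     if total_rows <= 0:
--         raise ValueError(f"total_rows must be > 0, got {total_rows}")
--
--     base, remainder = divmod(total_rows, len(TASK_TYPES))
--     counts: dict[str, int] = {}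
--     for idx, task in enumerate(TASK_TYPES):
--         counts[task] = base + (1 if idx < remainder else 0)
--     return counts
-- ===== SOURCE B (Python) =====
-- TASK_TYPES = (
--     "list_all_pieces",
--     "count_by_color",
--     "list_color_pieces",
--     "color_presence_check",
-- )
--
-- def build_balanced_mixed_task_counts(total_rows: int) -> dict[str, int]:
--     """Distribute rows across mixed tasks as evenly as possible."""
--     if total_rows <= 0:
--         raise ValueError(f"total_rows must be > 0, got {total_rows}")
--     # Greedy fair division: repeatedly give the next task its fair (ceiling)
--     # share of whatever rows remain, then recurse on the shrunken problem.
--     counts: dict[str, int] = {}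
--     tasks = list(TASK_TYPES)
--     remaining = total_rows
--     while tasks:
--         take = -(-remaining // len(tasks))  # ceil(remaining / tasks left)
--         counts[tasks.pop(0)] = take
--         remaining -= take
--     return counts
-- ===== Notes on version B (the rewrite author's own statement) =====
-- stated objective: alternative
-- what changed: Replaces the one-shot divmod with per-index branch by a greedy worklist loop that repeatedly gives the next task the ceiling share of the rows still remaining and recurses on the shrunken (remaining, tasks-left) state.
import Mathlib
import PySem

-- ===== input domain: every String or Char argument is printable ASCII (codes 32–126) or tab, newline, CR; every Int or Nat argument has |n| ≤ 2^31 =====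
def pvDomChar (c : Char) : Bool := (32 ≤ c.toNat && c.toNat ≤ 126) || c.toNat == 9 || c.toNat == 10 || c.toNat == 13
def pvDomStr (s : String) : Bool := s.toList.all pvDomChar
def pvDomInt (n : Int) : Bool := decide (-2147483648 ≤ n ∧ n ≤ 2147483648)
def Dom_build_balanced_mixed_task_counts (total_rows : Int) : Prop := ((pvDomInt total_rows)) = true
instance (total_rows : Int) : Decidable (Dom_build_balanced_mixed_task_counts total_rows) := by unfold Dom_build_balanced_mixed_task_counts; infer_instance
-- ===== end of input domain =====

-- B replaces A's one-shot divmod + per-index branch by a greedy worklist loop handing each task the ceiling share of the rows still remaining (objective: alternative).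

-- ===== PORT A =====
def pvTaskTypes : List String :=
  ["list_all_pieces", "count_by_color", "list_color_pieces", "color_presence_check"]

def build_balanced_mixed_task_counts (total_rows : Int) : List (String × Int) :=
  let base := PySem.Int.floordiv total_rows (pvTaskTypes.length : Int)
  let remainder := PySem.Int.mod total_rows (pvTaskTypes.length : Int)
  ((PySem.List.enumerate pvTaskTypes 0).foldl
    (fun (counts : PySem.Dict String Int) p =>
      counts.insert p.2 (base + (if p.1 < remainder then 1 else 0)))
    PySem.Dict.empty).items

-- ===== PORT B =====
-- while tasks: take = -(-remaining // len(tasks)); counts[tasks.pop(0)] = take; remaining -= take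
def pvAltLoop : List String → Int → PySem.Dict String Int → PySem.Dict String Int
  | [], _, counts => counts
  | t :: ts, remaining, counts =>
    let take := -(PySem.Int.floordiv (-remaining) ((ts.length + 1 : Nat) : Int))
    pvAltLoop ts (remaining - take) (counts.insert t take)

def build_balanced_mixed_task_counts_alt (total_rows : Int) : List (String × Int) :=
  (pvAltLoop pvTaskTypes total_rows PySem.Dict.empty).items

-- ===== PRECONDITION & SPEC =====
-- A raises ValueError on nonpositive total_rows (B does too); Pre_ admits exactly the inputs where A returns.
def Pre_build_balanced_mixed_task_counts (total_rows : Int) : Prop := 0 < total_rows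
instance (total_rows : Int) : Decidable (Pre_build_balanced_mixed_task_counts total_rows) := by unfold Pre_build_balanced_mixed_task_counts; infer_instance
def pvWitness_build_balanced_mixed_task_counts : Int := 7

def Spec_build_balanced_mixed_task_counts (total_rows : Int) (out : List (String × Int)) : Prop := out = build_balanced_mixed_task_counts_alt total_rows
instance (total_rows : Int) (out : List (String × Int)) : Decidable (Spec_build_balanced_mixed_task_counts total_rows out) := by unfold Spec_build_balanced_mixed_task_counts; infer_instance

-- ===== CLAIM (what is proved, stated in full; the proofs are below) =====
def Claim_equal_build_balanced_mixed_task_counts : Prop := ∀ (total_rows : Int), Dom_build_balanced_mixed_task_counts total_rows → Pre_build_balanced_mixed_task_counts total_rows → Spec_build_balanced_mixed_task_counts total_rows (build_balanced_mixed_task_counts total_rows)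

-- ===== LEMMAS AND PROOFS =====

-- ===== VERDICT (by name: the statement is the Claim_ definition above) =====
theorem build_balanced_mixed_task_counts_spec : Claim_equal_build_balanced_mixed_task_counts := by
  intro n _ hpos
  unfold Spec_build_balanced_mixed_task_counts
  unfold build_balanced_mixed_task_counts build_balanced_mixed_task_counts_alt pvAltLoop pvTaskTypes
  simp only [PySem.List.enumerate_cons, PySem.List.enumerate_nil, List.foldl,
    List.length_cons, List.length_nil]
  norm_num
  simp [pvAltLoop, PySem.Dict.insert, PySem.Dict.empty]
  refine ⟨?_, ?_, ?_, ?_⟩ <;> (split_ifs with h <;> omega)
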